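-- pv_equiv track=rewrite | github.com/RunjeethNikam/CPP | cpp/GCD_Problem.py | build
-- ===== SOURCE A (Python) =====
-- import math
--
-- def build(given, tree, low, high, pos):
--     if(low == high):
--         tree[pos][0] = given[low]
--         tree[pos][1] = 0
--         return tree[pos]
--     mid = low + (high-low)//2
--     left = build(given, tree, low, mid, 2*pos + 1)
--     right = build(given, tree, mid+1, high, 2*pos + 2)
--     tree[pos][0] = math.gcd(left[0], right[0])
--     if(left[1] == right[1] == 0):
--         tree[pos][1] = math.gcd(left[0], right[0])
--     elif(left[1] == 0):
--         tree[pos][1] = right[1]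
--     elif(right[1] == 0):
--         tree[pos][1] = left[1]
--     else:
--         tree[pos][1] = left[1] + right[1]
--     return tree[pos]
-- ===== SOURCE B (Python) =====
-- import math
--
-- def build(given, tree, low, high, pos):
--     # iterative post-order traversal with an explicit stack instead of recursion;
--     # the combine step reads the children's entries back out of `tree`
--     stack = [(low, high, pos, False)]
--     while stack:
--         l, h, p, ready = stack.pop()
--         if h < l:
--             # invalid segment (only possible when called with low > high, where the
--             # recursive version never returns): drop the frame
--             continue
--         if l == h:
--             tree[p][0] = given[l]
--             tree[p][1] = 0
--         elif not ready:
--             m = l + (h - l) // 2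
--             stack.append((l, h, p, True))
--             stack.append((m + 1, h, 2 * p + 2, False))
--             stack.append((l, m, 2 * p + 1, False))
--         else:
--             l0, l1 = tree[2 * p + 1][0], tree[2 * p + 1][1]
--             r0, r1 = tree[2 * p + 2][0], tree[2 * p + 2][1]
--             g = math.gcd(l0, r0)
--             if l1 == 0 and r1 == 0:
--                 s = g
--             elif l1 == 0:
--                 s = r1
--             elif r1 == 0:
--                 s = l1
--             else:
--                 s = l1 + r1
--             tree[p][0] = g
--             tree[p][1] = s
--     return tree[pos]
-- ===== Notes on version B (the rewrite author's own statement) =====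
-- stated objective: alternative
-- what changed: The recursive tree build is replaced by an iterative explicit-stack post-order traversal (frames with a ready-marker) whose combine step reads the children's entries back out of the tree array into scalars instead of receiving row objects from recursive calls.
import Mathlib
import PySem

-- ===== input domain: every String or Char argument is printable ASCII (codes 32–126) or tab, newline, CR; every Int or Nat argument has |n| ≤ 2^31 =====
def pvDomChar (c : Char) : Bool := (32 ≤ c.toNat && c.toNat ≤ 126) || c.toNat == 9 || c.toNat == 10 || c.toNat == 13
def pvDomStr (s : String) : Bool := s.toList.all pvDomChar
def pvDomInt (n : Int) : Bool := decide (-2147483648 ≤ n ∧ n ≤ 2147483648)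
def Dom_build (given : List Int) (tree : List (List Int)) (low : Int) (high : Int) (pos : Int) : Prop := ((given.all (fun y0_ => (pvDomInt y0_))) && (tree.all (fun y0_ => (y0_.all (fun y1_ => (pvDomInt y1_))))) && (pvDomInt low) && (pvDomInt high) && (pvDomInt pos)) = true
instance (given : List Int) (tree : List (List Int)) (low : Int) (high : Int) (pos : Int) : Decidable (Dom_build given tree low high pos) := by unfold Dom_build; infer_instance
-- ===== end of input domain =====

-- B replaces A's recursion by an explicit-stack post-order traversal (frames with a
-- ready-marker); the combine step reads the children's entries back out of the tree array.
-- Both Pythons mutate `tree` identically in place; the equivalence proved is about the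
-- returned row (the final trees coincide as well, as the simulation lemma shows).


-- ===== PORT A =====
-- math.gcd(a, b): the nonnegative gcd of two Python ints (shared by both ports)
def pyMathGcd (a b : Int) : Int := (Int.gcd a b : Int)

-- the leaf statements `tree[pos][0] = given[low]; tree[pos][1] = 0` as two slot updates
def leafA (given : List Int) (t : List (List Int)) (l p : Int) : List (List Int) :=
  let t1 := PySem.List.pySetD t p ((PySem.List.pyGetD t p []).set 0 (PySem.List.pyGetD given l 0))
  PySem.List.pySetD t1 p ((PySem.List.pyGetD t1 p []).set 1 0)

-- the combine statements of A.  Python's `left`/`right` are the list objects stored in the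
-- slots 2*pos+1 / 2*pos+2 of `tree`, mutated only in place, so reading the slot at each use
-- is exact — including the re-read of left[0]/right[0] in the first cascade branch, which in
-- Python happens AFTER the `tree[pos][0] = …` write (observable when a slot aliases `pos`
-- through a negative index).
def nodeA (t : List (List Int)) (p : Int) : List (List Int) :=
  let g := pyMathGcd (PySem.List.pyGetD (PySem.List.pyGetD t (2*p+1) []) 0 0)
                     (PySem.List.pyGetD (PySem.List.pyGetD t (2*p+2) []) 0 0)
  let t3 := PySem.List.pySetD t p ((PySem.List.pyGetD t p []).set 0 g)
  let l0 := PySem.List.pyGetD (PySem.List.pyGetD t3 (2*p+1) []) 0 0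
  let l1 := PySem.List.pyGetD (PySem.List.pyGetD t3 (2*p+1) []) 1 0
  let r0 := PySem.List.pyGetD (PySem.List.pyGetD t3 (2*p+2) []) 0 0
  let r1 := PySem.List.pyGetD (PySem.List.pyGetD t3 (2*p+2) []) 1 0
  let s := if l1 = r1 ∧ r1 = 0 then pyMathGcd l0 r0
           else if l1 = 0 then r1
           else if r1 = 0 then l1
           else l1 + r1
  PySem.List.pySetD t3 p ((PySem.List.pyGetD t3 p []).set 1 s)

-- A's recursion, threading the mutated tree; the fuel (high-low).toNat+1 (= segment size)
-- bounds the recursion depth and is never exhausted when low ≤ high (totality guard only)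
def buildA (given : List Int) : Nat → List (List Int) → Int → Int → Int → List (List Int)
  | 0, t, _, _, _ => t
  | f+1, t, low, high, pos =>
    if low = high then
      leafA given t low pos
    else
      let mid := low + PySem.Int.floordiv (high - low) 2
      let t1 := buildA given f t low mid (2*pos + 1)
      let t2 := buildA given f t1 (mid + 1) high (2*pos + 2)
      nodeA t2 pos

def build (given : List Int) (tree : List (List Int)) (low : Int) (high : Int) (pos : Int) : List Int :=
  PySem.List.pyGetD (buildA given ((high - low).toNat + 1) tree low high pos) pos []

-- ===== PORT B =====
-- leaf write of Source B (same two statements as A's leaf)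
def leafB (given : List Int) (t : List (List Int)) (l p : Int) : List (List Int) :=
  let t1 := PySem.List.pySetD t p ((PySem.List.pyGetD t p []).set 0 (PySem.List.pyGetD given l 0))
  PySem.List.pySetD t1 p ((PySem.List.pyGetD t1 p []).set 1 0)

-- combine of Source B: both children's entries are read into scalars BEFORE the writes
def nodeB (t : List (List Int)) (p : Int) : List (List Int) :=
  let l0 := PySem.List.pyGetD (PySem.List.pyGetD t (2*p+1) []) 0 0
  let l1 := PySem.List.pyGetD (PySem.List.pyGetD t (2*p+1) []) 1 0
  let r0 := PySem.List.pyGetD (PySem.List.pyGetD t (2*p+2) []) 0 0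
  let r1 := PySem.List.pyGetD (PySem.List.pyGetD t (2*p+2) []) 1 0
  let g := pyMathGcd l0 r0
  let s := if l1 = 0 ∧ r1 = 0 then g
           else if l1 = 0 then r1
           else if r1 = 0 then l1
           else l1 + r1
  let t3 := PySem.List.pySetD t p ((PySem.List.pyGetD t p []).set 0 g)
  PySem.List.pySetD t3 p ((PySem.List.pyGetD t3 p []).set 1 s)

-- the stack machine of Source B: pop a frame; a leaf writes its row, an unready internal frame
-- pushes left child, right child and itself (ready), a ready frame combines.  Fuel bounds
-- the number of pops (3·size suffices; totality guard only).
def stepB (given : List Int) : Nat → List (List Int) → List (Int × Int × Int × Bool) → List (List Int)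
  | 0, t, _ => t
  | _+1, t, [] => t
  | f+1, t, (l, h, p, ready) :: rest =>
    if h < l then
      stepB given f t rest
    else if l = h then
      stepB given f (leafB given t l p) rest
    else if ready = false then
      let m := l + PySem.Int.floordiv (h - l) 2
      stepB given f t ((l, m, 2*p + 1, false) :: (m + 1, h, 2*p + 2, false) :: (l, h, p, true) :: rest)
    else
      stepB given f (nodeB t p) rest

def build_alt (given : List Int) (tree : List (List Int)) (low : Int) (high : Int) (pos : Int) : List Int :=
  PySem.List.pyGetD (stepB given (3 * (high - low).toNat + 3) tree [(low, high, pos, false)]) pos []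

-- ===== PRECONDITION & SPEC =====
-- Pre_build holds exactly when the Python A returns normally (A's domain is irreducibly
-- recursive): low ≤ high (otherwise A recurses forever) and, at every node of the segment
-- tree of [low, high] rooted at position pos, the indices A uses there are in range — at a
-- leaf `given[low]` and the slot `tree[pos]`, at every node the slot `tree[pos]` with a row
-- long enough for the writes to [0] and [1].  preRecB checks only these index bounds over
-- the segment tree — a shape condition on the inputs; it computes none of A's values; the structural fuel argument,
-- one more than the segment size, is never exhausted on those segments.
def preRecB (given : List Int) (tree : List (List Int)) : Nat → Int → Int → Int → Bool
  | 0, _, _, _ => false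
  | fuel+1, l, h, p =>
    if l = h then
      decide (PySem.Raise.InRange given.length l) && decide (PySem.Raise.InRange tree.length p)
        && decide (2 ≤ (PySem.List.pyGetD tree p []).length)
    else if h < l then false
    else
      decide (PySem.Raise.InRange tree.length p)
        && decide (2 ≤ (PySem.List.pyGetD tree p []).length)
        && preRecB given tree fuel l (l + PySem.Int.floordiv (h - l) 2) (2*p + 1)
        && preRecB given tree fuel (l + PySem.Int.floordiv (h - l) 2 + 1) h (2*p + 2)

def Pre_build (given : List Int) (tree : List (List Int)) (low : Int) (high : Int) (pos : Int) : Prop :=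
  preRecB given tree ((high - low).toNat + 1) low high pos = true
instance (given : List Int) (tree : List (List Int)) (low : Int) (high : Int) (pos : Int) : Decidable (Pre_build given tree low high pos) := by unfold Pre_build; infer_instance

def pvWitness_build : List Int × List (List Int) × Int × Int × Int := ([6, 4], [[0, 0], [0, 0], [0, 0]], 0, 1, 0)

def Spec_build (given : List Int) (tree : List (List Int)) (low : Int) (high : Int) (pos : Int) (out : List Int) : Prop := out = build_alt given tree low high pos
instance (given : List Int) (tree : List (List Int)) (low : Int) (high : Int) (pos : Int) (out : List Int) : Decidable (Spec_build given tree low high pos out) := by unfold Spec_build; infer_instance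

-- ===== CLAIM =====
def Claim_equal_build : Prop := ∀ (given : List Int) (tree : List (List Int)) (low : Int) (high : Int) (pos : Int), Dom_build given tree low high pos → Pre_build given tree low high pos → Spec_build given tree low high pos (build given tree low high pos)


-- ===== LEMMAS AND PROOFS =====

theorem pyIdx?_lt {n : Nat} {i : Int} {k : Nat} (h : PySem.List.pyIdx? n i = some k) : k < n := by
  unfold PySem.List.pyIdx? at h
  split_ifs at h <;> simp_all <;> omega

-- reading slot c after writing slot p: either the two slots coincide (then the read sees the
-- written row and the pre-write reads at c and p coincide), or the read is unchanged
theorem outer_read (t : List (List Int)) (p c : Int) (v : List Int) :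
    (PySem.List.pyGetD (PySem.List.pySetD t p v) c [] = v ∧
      PySem.List.pyGetD t c [] = PySem.List.pyGetD t p []) ∨
    PySem.List.pyGetD (PySem.List.pySetD t p v) c [] = PySem.List.pyGetD t c [] := by
  cases hp : PySem.List.pyIdx? t.length p with
  | none => right; simp [PySem.List.pySetD, PySem.List.pySet?, hp]
  | some kp =>
    have hkp : kp < t.length := pyIdx?_lt hp
    have hset : PySem.List.pySetD t p v = t.set kp v := by
      simp [PySem.List.pySetD, PySem.List.pySet?, hp]
    cases hc : PySem.List.pyIdx? t.length c with
    | none =>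
      right
      simp [PySem.List.pyGetD, PySem.List.pyGet?, hset, List.length_set, hc]
    | some kc =>
      have hkc : kc < t.length := pyIdx?_lt hc
      by_cases hEq : kc = kp
      · left
        subst hEq
        constructor
        · simp [PySem.List.pyGetD, PySem.List.pyGet?, hset, List.length_set, hc,
            hkc]
        · simp [PySem.List.pyGetD, PySem.List.pyGet?, hc, hp]
      · right
        simp [PySem.List.pyGetD, PySem.List.pyGet?, hset, List.length_set, hc,
          List.getElem?_set_ne (fun h => hEq h.symm)]

theorem row_set_zero_getD_one (row : List Int) (g : Int) :
    (row.set 0 g).getD 1 0 = row.getD 1 0 := by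
  simp [List.getD, List.getElem?_set_ne (by omega : (0:Nat) ≠ 1)]

theorem row_set_zero_getD_zero (row : List Int) (g : Int) :
    (row.set 0 g).getD 0 0 = g ∨ (row.set 0 g).getD 0 0 = row.getD 0 0 := by
  cases row with
  | nil => right; rfl
  | cons a rest => left; rfl

theorem gcd_absorb_left (x y : Int) : pyMathGcd (pyMathGcd x y) y = pyMathGcd x y := by
  simp [pyMathGcd, Int.gcd]

theorem gcd_absorb_right (x y : Int) : pyMathGcd x (pyMathGcd x y) = pyMathGcd x y := by
  simp [pyMathGcd, Int.gcd]

theorem gcd_self_abs (x y : Int) : pyMathGcd (pyMathGcd x y) (pyMathGcd x y) = pyMathGcd x y := by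
  simp [pyMathGcd, Int.gcd]

-- the two combine blocks write the same tree
theorem node_eq (t : List (List Int)) (p : Int) : nodeA t p = nodeB t p := by
  unfold nodeA nodeB
  simp only [PySem.List.pyGetD_ofNat']
  generalize hL0 : (PySem.List.pyGetD t (2*p+1) []).getD 0 0 = l0
  generalize hL1 : (PySem.List.pyGetD t (2*p+1) []).getD 1 0 = l1
  generalize hR0 : (PySem.List.pyGetD t (2*p+2) []).getD 0 0 = r0
  generalize hR1 : (PySem.List.pyGetD t (2*p+2) []).getD 1 0 = r1
  set RP : List Int := PySem.List.pyGetD t p [] with hRP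
  congr 2
  have hL := outer_read t p (2*p+1) (RP.set 0 (pyMathGcd l0 r0))
  have hR := outer_read t p (2*p+2) (RP.set 0 (pyMathGcd l0 r0))
  rw [← hRP] at hL hR
  have hcond : ∀ x y : Int, (x = y ∧ y = 0) = (x = 0 ∧ y = 0) := by
    intro x y; apply propext; constructor <;> rintro ⟨a, b⟩ <;> subst b <;> exact ⟨a, rfl⟩
  rcases hL with ⟨hv, he⟩ | hs
  · have h1 : RP.getD 1 0 = l1 := by rw [← he, hL1]
    have h4 : RP.getD 0 0 = l0 := by rw [← he, hL0]
    rcases hR with ⟨hv', he'⟩ | hs'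
    · have h2 : r1 = l1 := by rw [← hR1, he', h1]
      have h3 : r0 = l0 := by rw [← hR0, he', h4]
      rw [hv, hv', row_set_zero_getD_one, h1, h2]
      rcases row_set_zero_getD_zero RP (pyMathGcd l0 r0) with h0 | h0 <;> rw [h0]
      · by_cases hb : l1 = 0 <;> simp [hb, gcd_self_abs, h3]
      · rw [h4]
        by_cases hb : l1 = 0 <;> simp [hb, h3]
    · rw [hv, hs', row_set_zero_getD_one, h1, hR0, hR1]
      simp only [hcond]
      rcases row_set_zero_getD_zero RP (pyMathGcd l0 r0) with h0 | h0 <;> rw [h0]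
      · rw [gcd_absorb_left]
      · rw [h4]
  · have h5 : (PySem.List.pyGetD (PySem.List.pySetD t p (RP.set 0 (pyMathGcd l0 r0)))
        (2*p+1) []).getD 0 0 = l0 := by rw [hs, hL0]
    have h6 : (PySem.List.pyGetD (PySem.List.pySetD t p (RP.set 0 (pyMathGcd l0 r0)))
        (2*p+1) []).getD 1 0 = l1 := by rw [hs, hL1]
    rcases hR with ⟨hv', he'⟩ | hs'
    · have h1 : RP.getD 1 0 = r1 := by rw [← he', hR1]
      have h4 : RP.getD 0 0 = r0 := by rw [← he', hR0]
      rw [hv', row_set_zero_getD_one, h1, h5, h6]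
      simp only [hcond]
      rcases row_set_zero_getD_zero RP (pyMathGcd l0 r0) with h0 | h0 <;> rw [h0]
      · rw [gcd_absorb_right]
      · rw [h4]
    · rw [hs, hs', hL0, hL1, hR0, hR1]
      simp only [hcond]

theorem leaf_eq (given : List Int) (t : List (List Int)) (l p : Int) :
    leafA given t l p = leafB given t l p := rfl

theorem stepB_nil (given : List Int) (f : Nat) (t : List (List Int)) : stepB given f t [] = t := by
  cases f <;> simp [stepB]

theorem buildA_fuel (given : List Int) (n : Nat) : ∀ f f' (t : List (List Int)) l h p, l ≤ h →
    (h - l).toNat + 1 = n → n ≤ f → n ≤ f' →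
    buildA given f t l h p = buildA given f' t l h p := by
  induction n using Nat.strong_induction_on with
  | _ n ih =>
    intro f f' t l h p hlh hn hf hf'
    obtain ⟨f0, rfl⟩ : ∃ f0, f = f0 + 1 := ⟨f - 1, by omega⟩
    obtain ⟨f1, rfl⟩ : ∃ f1, f' = f1 + 1 := ⟨f' - 1, by omega⟩
    simp only [buildA]
    by_cases hE : l = h
    · simp [hE]
    · rw [if_neg hE, if_neg hE,
        PySem.Int.floordiv_eq_ediv_of_pos (by norm_num : (0:Int) < 2)]
      have hm1 : l ≤ l + (h - l) / 2 := by omega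
      have hm2 : l + (h - l) / 2 < h := by omega
      rw [ih ((l + (h - l) / 2 - l).toNat + 1) (by omega) f0 f1 t l (l + (h - l) / 2)
        (2 * p + 1) hm1 rfl (by omega) (by omega)]
      rw [ih ((h - (l + (h - l) / 2 + 1)).toNat + 1) (by omega) f0 f1 _
        (l + (h - l) / 2 + 1) h (2 * p + 2) (by omega) rfl (by omega) (by omega)]

theorem sim (given : List Int) (n : Nat) : ∀ l h (p : Int) t rest f, l ≤ h →
    (h - l).toNat + 1 = n → 3 * n ≤ f →
    stepB given f t ((l, h, p, false) :: rest)
      = stepB given (f - (3 * n - 2)) (buildA given n t l h p) rest := by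
  induction n using Nat.strong_induction_on with
  | _ n ih =>
    intro l h p t rest f hlh hn hf
    obtain ⟨f0, rfl⟩ : ∃ f0, f = f0 + 1 := ⟨f - 1, by omega⟩
    rw [← hn]
    by_cases hE : l = h
    · subst hE
      simp [stepB, buildA, leaf_eq]
    · have hlt : l < h := lt_of_le_of_ne hlh hE
      rw [show stepB given (f0 + 1) t ((l, h, p, false) :: rest)
          = stepB given f0 t ((l, l + PySem.Int.floordiv (h - l) 2, 2 * p + 1, false)
              :: (l + PySem.Int.floordiv (h - l) 2 + 1, h, 2 * p + 2, false)
              :: (l, h, p, true) :: rest) from by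
        simp only [stepB]; rw [if_neg (by omega : ¬ h < l), if_neg hE]; simp]
      rw [PySem.Int.floordiv_eq_ediv_of_pos (by norm_num : (0:Int) < 2)]
      have hml : l ≤ l + (h - l) / 2 := by omega
      have hmh : l + (h - l) / 2 < h := by omega
      set nL := (l + (h - l) / 2 - l).toNat + 1 with hnL
      set nR := (h - (l + (h - l) / 2 + 1)).toNat + 1 with hnR
      rw [ih nL (by omega) l (l + (h - l) / 2) (2 * p + 1) t _ f0 hml rfl (by omega)]
      rw [ih nR (by omega) (l + (h - l) / 2 + 1) h (2 * p + 2) _ _ _ (by omega) rfl (by omega)]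
      have hsum : nL + nR = n := by omega
      obtain ⟨F, hF⟩ : ∃ F, f0 - (3 * nL - 2) - (3 * nR - 2) = F + 1 :=
        ⟨f0 - (3 * nL - 2) - (3 * nR - 2) - 1, by omega⟩
      rw [hF]
      rw [show stepB given (F + 1) (buildA given nR (buildA given nL t l (l + (h - l) / 2)
            (2 * p + 1)) (l + (h - l) / 2 + 1) h (2 * p + 2)) ((l, h, p, true) :: rest)
          = stepB given F (nodeB (buildA given nR (buildA given nL t l (l + (h - l) / 2)
            (2 * p + 1)) (l + (h - l) / 2 + 1) h (2 * p + 2)) p) rest from by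
        simp only [stepB]; rw [if_neg (by omega : ¬ h < l), if_neg hE]; simp]
      simp only [buildA]
      rw [if_neg hE, PySem.Int.floordiv_eq_ediv_of_pos (by norm_num : (0:Int) < 2)]
      rw [buildA_fuel given nL ((h - l).toNat) nL t l (l + (h - l) / 2) (2 * p + 1) hml rfl
        (by omega) (by omega)]
      rw [buildA_fuel given nR ((h - l).toNat) nR _ (l + (h - l) / 2 + 1) h (2 * p + 2)
        (by omega) rfl (by omega) (by omega)]
      rw [node_eq]
      rw [show f0 + 1 - (3 * ((h - l).toNat + 1) - 2) = F by omega]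

theorem preRecB_le {given : List Int} {tree : List (List Int)} {fuel : Nat} {l h p : Int}
    (hp : preRecB given tree (fuel + 1) l h p = true) : l ≤ h := by
  rw [preRecB] at hp
  split_ifs at hp <;> omega

-- ===== VERDICT =====
theorem build_spec : Claim_equal_build := by
  intro given tree low high pos _ hPre
  have hlh : low ≤ high := preRecB_le hPre
  unfold Spec_build build build_alt
  rw [sim given ((high - low).toNat + 1) low high pos tree [] _ hlh rfl (by omega)]
  rw [stepB_nil]
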